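-- pv_equiv track=rewrite | github.com/balhaddad-sys/shifu-ocr | test_arc.py | apply_scaling
-- ===== SOURCE A (Python) =====
-- from typing import List, Tuple, Optional, Dict, Set, Callable
--
-- Grid = List[List[int]]
--
-- def dims(g: Grid) -> Tuple[int, int]:
--     return len(g), len(g[0]) if g else 0
--
-- def make(rows: int, cols: int, fill: int = 0) -> Grid:
--     return [[fill] * cols for _ in range(rows)]
--
-- def apply_scaling(inp: Grid, rule: Dict) -> Grid:
--     sr, sc = rule['sr'], rule['sc']
--     ir, ic = dims(inp)
--     out = make(ir * sr, ic * sc)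
--     for r in range(ir):
--         for c in range(ic):
--             for dr in range(sr):
--                 for dc in range(sc):
--                     out[r*sr+dr][c*sc+dc] = inp[r][c]
--     return out
-- ===== SOURCE B (Python) =====
-- def apply_scaling(inp, rule):
--     sr, sc = rule['sr'], rule['sc']
--     out = []
--     for row in inp:
--         new_row = [v for v in row for _ in range(sc)]
--         for _ in range(sr):
--             out.append(list(new_row))
--     return out
-- ===== Notes on version B (the rewrite author's own statement) =====
-- stated objective: simpler
-- what changed: B builds each output row once by source-driven repetition (each value repeated sc times, then sr fresh copies of the row appended) instead of preallocating a zero grid and scatter-writing every cell through r*sr+dr / c*sc+dc index arithmetic in four nested loops; Pre_ restricts to rectangular grids with both scale keys present, the function's natural domain.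
-- outside the precondition, e.g. on apply_scaling([[1], [2, 3]], {'sr': 1, 'sc': 1}): A returns [[1], [2]], B returns [[1], [2, 3]]
import Mathlib
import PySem

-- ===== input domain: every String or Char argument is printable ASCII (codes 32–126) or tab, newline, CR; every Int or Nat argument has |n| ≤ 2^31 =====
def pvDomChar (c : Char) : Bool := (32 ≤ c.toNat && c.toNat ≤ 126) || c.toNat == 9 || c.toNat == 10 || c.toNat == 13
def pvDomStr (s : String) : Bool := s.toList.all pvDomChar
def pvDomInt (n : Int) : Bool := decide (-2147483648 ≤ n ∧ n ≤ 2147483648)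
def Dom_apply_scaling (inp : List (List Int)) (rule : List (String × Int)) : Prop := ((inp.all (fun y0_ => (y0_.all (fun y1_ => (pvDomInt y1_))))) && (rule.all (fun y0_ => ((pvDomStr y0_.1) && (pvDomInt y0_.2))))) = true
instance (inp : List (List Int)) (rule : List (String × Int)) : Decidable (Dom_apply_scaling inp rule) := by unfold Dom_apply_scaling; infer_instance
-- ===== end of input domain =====

-- B builds output rows by source-driven repetition instead of A's preallocate-and-scatter-write
-- index arithmetic (same asymptotic cost; simpler).


-- ===== PORT A =====
-- dims(g) = (len(g), len(g[0]) if g else 0); g[0] of a nonempty list is its head (exact)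
def pyDims (g : List (List Int)) : Int × Int :=
  ((g.length : Int), if g = [] then 0 else ((g.headD []).length : Int))

-- make(rows, cols, 0) = [[0]*cols for _ in range(rows)]; [0]*cols is PySem.List.pyRepeat [0] cols (exact)
def pyMake (rows cols : Int) : List (List Int) :=
  (PySem.List.pyRange 0 rows 1).map (fun _ => PySem.List.pyRepeat [(0 : Int)] cols)

-- rule['sr'] raises KeyError when the key is absent: Pre_ requires both keys, so the .getD defaults
-- are unreachable.  Whenever the four loops execute, r*sr+dr and c*sc+dc are ≥ 0, so .toNat is exact
-- there; inp[r][c] raises IndexError on a row shorter than ic: Pre_ excludes that, so that default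
-- is unreachable too.
def apply_scaling (inp : List (List Int)) (rule : List (String × Int)) : List (List Int) :=
  let sr := ((PySem.Dict.mk rule).get? "sr").getD 0
  let sc := ((PySem.Dict.mk rule).get? "sc").getD 0
  let ir := (pyDims inp).1
  let ic := (pyDims inp).2
  let out0 := pyMake (ir * sr) (ic * sc)
  (PySem.List.pyRange 0 ir 1).foldl (fun out r =>
    (PySem.List.pyRange 0 ic 1).foldl (fun out c =>
      (PySem.List.pyRange 0 sr 1).foldl (fun out dr =>
        (PySem.List.pyRange 0 sc 1).foldl (fun out dc =>
          out.modify (r * sr + dr).toNat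
            (fun row => row.set (c * sc + dc).toNat
              (PySem.List.pyGetD ((PySem.List.pyGet? inp r).getD []) c 0))) out) out) out) out0

-- ===== PORT B =====
def apply_scaling_alt (inp : List (List Int)) (rule : List (String × Int)) : List (List Int) :=
  let sr := ((PySem.Dict.mk rule).get? "sr").getD 0
  let sc := ((PySem.Dict.mk rule).get? "sc").getD 0
  inp.foldl (fun out row =>
    let newRow := row.flatMap (fun v => (PySem.List.pyRange 0 sc 1).map (fun _ => v))
    (PySem.List.pyRange 0 sr 1).foldl (fun out _ => out ++ [newRow]) out) []

-- ===== PRECONDITION & SPEC =====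
-- Pre_ requires both scale keys ('sr', 'sc') and — whenever both factors are positive, i.e. cells
-- are actually read — a rectangular grid: ragged grids are outside the natural Grid domain (there A
-- raises IndexError on a too-short row, and on a row longer than the first A and B handle the
-- unspecified extra cells differently — A reads only the first len(inp[0]) of them, B all).
def Pre_apply_scaling (inp : List (List Int)) (rule : List (String × Int)) : Prop :=
  ((PySem.Dict.mk rule).get? "sr").isSome = true ∧
  ((PySem.Dict.mk rule).get? "sc").isSome = true ∧
  (0 < ((PySem.Dict.mk rule).get? "sr").getD 0 → 0 < ((PySem.Dict.mk rule).get? "sc").getD 0 →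
    ∀ row ∈ inp, row.length = (inp.headD []).length)
instance (inp : List (List Int)) (rule : List (String × Int)) : Decidable (Pre_apply_scaling inp rule) := by unfold Pre_apply_scaling; infer_instance

def pvWitness_apply_scaling : List (List Int) × (List (String × Int)) :=
  ([[1, 2], [3, 4]], [("sr", 2), ("sc", 3)])

def Spec_apply_scaling (inp : List (List Int)) (rule : List (String × Int)) (out : List (List Int)) : Prop := out = apply_scaling_alt inp rule
instance (inp : List (List Int)) (rule : List (String × Int)) (out : List (List Int)) : Decidable (Spec_apply_scaling inp rule out) := by unfold Spec_apply_scaling; infer_instance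

-- ===== CLAIM (what is proved, stated in full; the proofs are below) =====
def Claim_equal_apply_scaling : Prop := ∀ (inp : List (List Int)) (rule : List (String × Int)), Dom_apply_scaling inp rule → Pre_apply_scaling inp rule → Spec_apply_scaling inp rule (apply_scaling inp rule)

-- ===== LEMMAS AND PROOFS =====

/-- `range(k)` is empty for non-positive `k`. -/
theorem pyRange_nonpos {k : Int} (h : k ≤ 0) : PySem.List.pyRange 0 k 1 = [] := by
  have h' : ¬ (0 : Int) < k := not_lt.mpr h
  unfold PySem.List.pyRange
  norm_num [h']

/-- Constant map over `range(k)` (the shape of a value repeated `k` times). -/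
theorem pyRange_map_const {α : Type} (k : Int) (x : α) :
    (PySem.List.pyRange 0 k 1).map (fun _ => x) = List.replicate k.toNat x := by
  by_cases h : k ≤ 0
  · rw [pyRange_nonpos h, Int.toNat_of_nonpos h]; rfl
  · rw [not_le] at h
    obtain ⟨n, rfl⟩ : ∃ n : Nat, k = (n : Int) := ⟨k.toNat, (Int.toNat_of_nonneg h.le).symm⟩
    rw [PySem.List.pyRange_zero_natCast, List.map_map]
    rw [show ((fun _ : Int => x) ∘ fun k : Nat => ((k : Int))) = (fun _ : Nat => x) from rfl]
    rw [List.map_const', List.length_range, Int.toNat_natCast]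

theorem pyDims_fst (g : List (List Int)) : (pyDims g).1 = (g.length : Int) := rfl

theorem pyDims_snd (g : List (List Int)) : (pyDims g).2 = ((g.headD []).length : Int) := by
  cases g <;> simp [pyDims]

theorem getD_eq_getElem?_getD {α : Type} (l : List α) (n : Nat) (d : α) :
    (l[n]?).getD d = l.getD n d := rfl

/-- Reading the element at the split point of a `drop`. -/
theorem getD_of_drop {α : Type} {R : List α} {c : Nat} {x : α} {rest : List α}
    (h : R.drop c = x :: rest) (d : α) : R.getD c d = x := by
  rw [← getD_eq_getElem?_getD]
  have h0 : (R.drop c)[0]? = some x := by rw [h]; rfl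
  rw [List.getElem?_drop, Nat.add_zero] at h0
  rw [h0]
  rfl

theorem set_append_off {α : Type} (xs ys : List α) (i : Nat) (a : α) :
    (xs ++ ys).set (xs.length + i) a = xs ++ ys.set i a := by
  simp only [le_add_iff_nonneg_right, zero_le, List.set_append_right, add_tsub_cancel_left]

theorem modify_append_off {α : Type} (xs ys : List α) (i : Nat) (f : α → α) :
    (xs ++ ys).modify (xs.length + i) f = xs ++ ys.modify i f := by
  induction xs with
  | nil => simp
  | cons x xs ih => simpa [Nat.succ_add] using ih

/-- Writing one value into `mid.length` consecutive cells replaces exactly that segment. -/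
theorem set_run (mid : List Int) : ∀ (pre post : List Int) (v : Int),
    (List.range mid.length).foldl (fun w dc => w.set (pre.length + dc) v) (pre ++ (mid ++ post))
      = pre ++ (List.replicate mid.length v ++ post) := by
  induction mid with
  | nil => intro pre post v; simp
  | cons x mid ih =>
    intro pre post v
    rw [List.length_cons, List.range_succ_eq_map, List.foldl_cons, List.foldl_map]
    have h1 : (pre ++ (x :: mid ++ post)).set (pre.length + 0) v
        = (pre ++ [v]) ++ (mid ++ post) := by
      rw [set_append_off pre _ 0 v]
      simp
    rw [h1]
    calc (List.range mid.length).foldl (fun w dc => w.set (pre.length + (dc + 1)) v)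
            ((pre ++ [v]) ++ (mid ++ post))
        = (List.range mid.length).foldl (fun w dc => w.set ((pre ++ [v]).length + dc) v)
            ((pre ++ [v]) ++ (mid ++ post)) := by
          apply PySem.List.foldl_congr_mem; intro acc dc _
          have h2 : pre.length + (dc + 1) = (pre ++ [v]).length + dc := by
            simp only [List.length_append, List.length_cons, List.length_nil]; omega
          rw [h2]
      _ = (pre ++ [v]) ++ (List.replicate mid.length v ++ post) := ih (pre ++ [v]) post v
      _ = pre ++ (List.replicate (mid.length + 1) v ++ post) := by
          simp [List.replicate_succ]

/-- A fold of modifications of one fixed row is one modification by the folded row function. -/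
theorem fold_modify_commute {α : Type} (t : Nat) (i : Nat) (h : α → Nat → α) (out : List α) :
    (List.range t).foldl (fun out dc => out.modify i (fun row => h row dc)) out
      = out.modify i (fun row => (List.range t).foldl h row) := by
  induction t generalizing out with
  | zero =>
    rw [List.range_zero, List.foldl_nil]
    have hid : (fun row : α => List.foldl h row []) = id := rfl
    rw [hid, List.modify_id]
  | succ t ih =>
    rw [List.range_succ, List.foldl_append, List.foldl_cons, List.foldl_nil, ih,
        List.modify_modify_eq]
    congr 1
    funext row
    simp [Function.comp, List.foldl_append]

/-- Modifying `s` consecutive identical rows replaces the whole block. -/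
theorem modify_run (s : Nat) : ∀ (w : List Int) (g : List Int → List Int)
    (pre post : List (List Int)),
    (List.range s).foldl (fun out dr => out.modify (pre.length + dr) g)
        (pre ++ (List.replicate s w ++ post))
      = pre ++ (List.replicate s (g w) ++ post) := by
  induction s with
  | zero => intro w g pre post; simp
  | succ s ih =>
    intro w g pre post
    rw [List.range_succ_eq_map, List.foldl_cons, List.foldl_map]
    have h1 : (pre ++ (List.replicate (s + 1) w ++ post)).modify (pre.length + 0) g
        = (pre ++ [g w]) ++ (List.replicate s w ++ post) := by
      rw [List.replicate_succ, List.cons_append, modify_append_off pre _ 0 g]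
      simp [List.modify]
    rw [h1]
    calc (List.range s).foldl (fun out dr => out.modify (pre.length + (dr + 1)) g)
            ((pre ++ [g w]) ++ (List.replicate s w ++ post))
        = (List.range s).foldl (fun out dr => out.modify ((pre ++ [g w]).length + dr) g)
            ((pre ++ [g w]) ++ (List.replicate s w ++ post)) := by
          apply PySem.List.foldl_congr_mem; intro acc dr _
          have h2 : pre.length + (dr + 1) = (pre ++ [g w]).length + dr := by
            simp only [List.length_append, List.length_cons, List.length_nil]; omega
          rw [h2]
      _ = (pre ++ [g w]) ++ (List.replicate s (g (w)) ++ post) := ih w g (pre ++ [g w]) post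
      _ = pre ++ (List.replicate (s + 1) (g w) ++ post) := by
          simp [List.replicate_succ]

/-- One column step of A: the `dr`/`dc` double loop fills one `t`-wide column block of the
`s` identical block rows. -/
theorem cstep_eq (s t : Nat) (v : Int) (c' : Nat) (srow : List Int) (hs : srow.length = c' * t)
    (tail0 : List Int) (pre post : List (List Int)) :
    (List.range s).foldl
      (fun out dr => (List.range t).foldl
        (fun out dc => out.modify (pre.length + dr)
          (fun row => row.set (c' * t + dc) v)) out)
      (pre ++ (List.replicate s (srow ++ (List.replicate t 0 ++ tail0)) ++ post))
    = pre ++ (List.replicate s ((srow ++ List.replicate t v) ++ tail0) ++ post) := by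
  have hcomm : ∀ (dr : Nat) (out : List (List Int)),
      (List.range t).foldl
        (fun out dc => out.modify (pre.length + dr)
          (fun row => row.set (c' * t + dc) v)) out
      = out.modify (pre.length + dr)
          (fun row => (List.range t).foldl (fun row dc => row.set (c' * t + dc) v) row) :=
    fun dr out => fold_modify_commute t (pre.length + dr) _ out
  simp only [hcomm]
  rw [modify_run]
  have hgw : (List.range t).foldl (fun row dc => row.set (c' * t + dc) v)
      (srow ++ (List.replicate t 0 ++ tail0)) = (srow ++ List.replicate t v) ++ tail0 := by
    have h1 := set_run (List.replicate t (0 : Int)) srow tail0 v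
    simp only [List.length_replicate] at h1
    rw [hs] at h1
    rw [h1, List.append_assoc]
  rw [hgw]

/-- The column loop of A scales one source row into the `s` identical rows of the current block. -/
theorem c_loop (s t : Nat) (R : List Int) : ∀ (rem : List Int) (c : Nat)
    (_hrem : rem = R.drop c) (srow : List Int) (_hs : srow.length = c * t)
    (pre post : List (List Int)),
    (List.range' c rem.length 1).foldl
      (fun out c' => (List.range s).foldl
        (fun out dr => (List.range t).foldl
          (fun out dc => out.modify (pre.length + dr)
            (fun row => row.set (c' * t + dc) (R.getD c' 0))) out) out)
      (pre ++ (List.replicate s (srow ++ List.replicate (rem.length * t) 0) ++ post))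
    = pre ++ (List.replicate s (srow ++ rem.flatMap (List.replicate t)) ++ post) := by
  intro rem
  induction rem with
  | nil => intro c _ srow _ pre post; simp
  | cons x rem ih =>
    intro c hrem srow hs pre post
    have hx : R.getD c 0 = x := getD_of_drop hrem.symm 0
    have hrem' : rem = R.drop (c + 1) := by
      rw [← List.tail_drop, ← hrem]
      rfl
    have hsplit : List.replicate ((rem.length + 1) * t) (0 : Int)
        = List.replicate t 0 ++ List.replicate (rem.length * t) 0 := by
      rw [← List.replicate_add]
      congr 1
      ring
    rw [List.length_cons, List.range'_succ, List.foldl_cons, hsplit, hx,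
        cstep_eq s t x c srow hs (List.replicate (rem.length * t) 0) pre post]
    have hs' : (srow ++ List.replicate t x).length = (c + 1) * t := by
      simp only [List.length_append, List.length_replicate, hs]
      ring
    rw [ih (c + 1) hrem' (srow ++ List.replicate t x) hs' pre post]
    simp [List.flatMap_cons, List.append_assoc]

/-- The row loop of A: scatter-writing into the preallocated zero grid produces exactly the
row-repetition grid. -/
theorem r_loop (s t m : Nat) (inp : List (List Int)) : ∀ (rem : List (List Int)) (k : Nat)
    (_hrem : rem = inp.drop k) (_hrect : ∀ row ∈ rem, row.length = m)
    (done : List (List Int)) (_hd : done.length = k * s),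
    (List.range' k rem.length 1).foldl
      (fun out r => (List.range m).foldl
        (fun out c => (List.range s).foldl
          (fun out dr => (List.range t).foldl
            (fun out dc => out.modify (r * s + dr)
              (fun row => row.set (c * t + dc) ((inp.getD r []).getD c 0))) out) out) out)
      (done ++ List.replicate (rem.length * s) (List.replicate (m * t) 0))
    = done ++ rem.flatMap (fun row => List.replicate s (row.flatMap (List.replicate t))) := by
  intro rem
  induction rem with
  | nil => intro k _ _ done _; simp
  | cons R rem ih =>
    intro k hrem hrect done hd
    have hR : inp.getD k [] = R := getD_of_drop hrem.symm []
    have hRlen : R.length = m := hrect R List.mem_cons_self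
    have hrem' : rem = inp.drop (k + 1) := by
      rw [← List.tail_drop, ← hrem]
      rfl
    have hsplit : List.replicate ((rem.length + 1) * s) (List.replicate (m * t) (0 : Int))
        = List.replicate s (List.replicate (m * t) 0)
          ++ List.replicate (rem.length * s) (List.replicate (m * t) 0) := by
      rw [← List.replicate_add]
      congr 1
      ring
    rw [List.length_cons, List.range'_succ, List.foldl_cons, hsplit]
    have hbody :
        (List.range m).foldl
          (fun out c => (List.range s).foldl
            (fun out dr => (List.range t).foldl
              (fun out dc => out.modify (k * s + dr)
                (fun row => row.set (c * t + dc) ((inp.getD k []).getD c 0))) out) out)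
          (done ++ (List.replicate s (List.replicate (m * t) 0)
            ++ List.replicate (rem.length * s) (List.replicate (m * t) 0)))
        = done ++ (List.replicate s (R.flatMap (List.replicate t))
            ++ List.replicate (rem.length * s) (List.replicate (m * t) 0)) := by
      rw [hR, ← hRlen, ← hd]
      have h0 := c_loop s t R R 0 rfl [] (by simp) done
        (List.replicate (rem.length * s) (List.replicate (R.length * t) 0))
      simp only [List.nil_append] at h0
      rw [← List.range_eq_range'] at h0
      exact h0
    rw [hbody, ← List.append_assoc]
    have hd' : (done ++ List.replicate s (R.flatMap (List.replicate t))).length = (k + 1) * s := by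
      simp only [List.length_append, List.length_replicate, hd]
      ring
    rw [ih (k + 1) hrem' (fun row h => hrect row (List.mem_cons_of_mem R h))
        (done ++ List.replicate s (R.flatMap (List.replicate t))) hd']
    simp [List.flatMap_cons, List.append_assoc]

/-- Python's `for` over rows with a constant contribution. -/
theorem flatMap_const_replicate (inp : List (List Int)) (s : Nat) (x : List Int) :
    inp.flatMap (fun _ => List.replicate s x) = List.replicate (inp.length * s) x := by
  induction inp with
  | nil => simp
  | cons R rem ih =>
    simp only [List.flatMap_cons, ih, List.length_cons]
    rw [Nat.succ_mul, Nat.add_comm, List.replicate_add]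

theorem flatMap_const_nil {α β : Type} (l : List α) : l.flatMap (fun _ => ([] : List β)) = [] := by
  induction l <;> simp_all

/-- `make(a, b, 0)` for natural sizes. -/
theorem pyMake_natCast (a b : Nat) :
    pyMake (a : Int) (b : Int) = List.replicate a (List.replicate b 0) := by
  unfold pyMake
  simp only [PySem.List.pyRepeat_singleton, Int.toNat_natCast, pyRange_map_const]

/-- B computes row-driven repetition. -/
theorem alt_eq (inp : List (List Int)) (rule : List (String × Int)) :
    apply_scaling_alt inp rule = inp.flatMap (fun row =>
      List.replicate (((PySem.Dict.mk rule).get? "sr").getD 0).toNat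
        (row.flatMap (fun v =>
          List.replicate (((PySem.Dict.mk rule).get? "sc").getD 0).toNat v))) := by
  unfold apply_scaling_alt
  simp only [pyRange_map_const, PySem.List.foldl_append_singleton_eq_map,
    PySem.List.foldl_append_eq_flatMap, List.nil_append]

/-- A's loop nest, for arbitrary scale factors, equals the row-repetition form. -/
theorem core_eq (inp : List (List Int)) (sr sc : Int)
    (hrect : 0 < sr → 0 < sc → ∀ row ∈ inp, row.length = (inp.headD []).length) :
    (PySem.List.pyRange 0 (pyDims inp).1 1).foldl
      (fun out r => (PySem.List.pyRange 0 (pyDims inp).2 1).foldl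
        (fun out c => (PySem.List.pyRange 0 sr 1).foldl
          (fun out dr => (PySem.List.pyRange 0 sc 1).foldl
            (fun out dc => out.modify (r * sr + dr).toNat
              (fun row => row.set (c * sc + dc).toNat
                (PySem.List.pyGetD ((PySem.List.pyGet? inp r).getD []) c 0))) out) out) out)
      (pyMake ((pyDims inp).1 * sr) ((pyDims inp).2 * sc))
    = inp.flatMap (fun row => List.replicate sr.toNat
        (row.flatMap (fun v => List.replicate sc.toNat v))) := by
  by_cases hsr : sr ≤ 0
  · have h1 : PySem.List.pyRange 0 sr 1 = [] := pyRange_nonpos hsr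
    have h2 : PySem.List.pyRange 0 ((pyDims inp).1 * sr) 1 = [] := by
      apply pyRange_nonpos
      rw [pyDims_fst]
      exact mul_nonpos_of_nonneg_of_nonpos (Int.natCast_nonneg _) hsr
    simp only [h1, List.foldl_nil, PySem.List.foldl_ignore, pyMake, h2, List.map_nil,
      Int.toNat_of_nonpos hsr, List.replicate_zero, flatMap_const_nil]
  · rw [not_le] at hsr
    by_cases hsc : sc ≤ 0
    · obtain ⟨s, rfl⟩ : ∃ s : Nat, sr = (s : Int) := ⟨sr.toNat, (Int.toNat_of_nonneg hsr.le).symm⟩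
      have h1 : PySem.List.pyRange 0 sc 1 = [] := pyRange_nonpos hsc
      have h2 : PySem.List.pyRepeat [(0 : Int)] ((pyDims inp).2 * sc) = [] := by
        rw [PySem.List.pyRepeat_singleton, Int.toNat_of_nonpos, List.replicate_zero]
        rw [pyDims_snd]
        exact mul_nonpos_of_nonneg_of_nonpos (Int.natCast_nonneg _) hsc
      simp only [h1, List.foldl_nil, PySem.List.foldl_ignore, pyMake, h2,
        Int.toNat_of_nonpos hsc, List.replicate_zero, flatMap_const_nil,
        pyRange_map_const, pyDims_fst, Int.toNat_natCast, flatMap_const_replicate]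
      rw [← Nat.cast_mul, Int.toNat_natCast]
    · rw [not_le] at hsc
      -- both factors positive: the scatter-write loops really run
      obtain ⟨s, rfl⟩ : ∃ s : Nat, sr = (s : Int) := ⟨sr.toNat, (Int.toNat_of_nonneg hsr.le).symm⟩
      obtain ⟨t, rfl⟩ : ∃ t : Nat, sc = (t : Int) := ⟨sc.toNat, (Int.toNat_of_nonneg hsc.le).symm⟩
      have hrect' : ∀ row ∈ inp, row.length = (inp.headD []).length := hrect hsr hsc
      rw [pyDims_fst, pyDims_snd, ← Nat.cast_mul, ← Nat.cast_mul, pyMake_natCast]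
      simp only [PySem.List.pyRange_zero_natCast, List.foldl_map, ← Nat.cast_mul,
        ← Nat.cast_add, Int.toNat_natCast, PySem.List.pyGet?_natCast,
        getD_eq_getElem?_getD, PySem.List.pyGetD_natCast]
      have h0 := r_loop s t (inp.headD []).length inp inp 0 rfl hrect' [] (by simp)
      simp only [List.nil_append, List.range_eq_range'] at h0 ⊢
      exact h0

-- ===== VERDICT (by name: the statement is the Claim_ definition above) =====
theorem apply_scaling_spec : Claim_equal_apply_scaling := by
  intro inp rule _ hpre
  obtain ⟨_, _, hrect⟩ := hpre
  show apply_scaling inp rule = apply_scaling_alt inp rule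
  rw [alt_eq]
  exact core_eq inp _ _ hrect
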